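-- pv_equiv track=rewrite | github.com/ProtossLuigi/random-projects | c4/__main__.py | count_discs
-- ===== SOURCE A (Python) =====
-- def count_discs(x, y, v, h, state):
--     if v == 0 and h == 0:
--         return 1 + max([
--             count_discs(x, y, -1, 0, state) + count_discs(x, y, 1, 0, state),
--             count_discs(x, y, 0, -1, state) + count_discs(x, y, 0, 1, state),
--             count_discs(x, y, -1, -1, state) + count_discs(x, y, 1, 1, state),
--             count_discs(x, y, -1, 1, state) + count_discs(x, y, 1, -1, state)
--         ])
--     else:
--         try:
--             if x + h < 0 or y + v < 0:
--                 raise IndexError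
--             if state[y][x] == state[y+v][x+h]:
--                 return 1 + count_discs(x+h, y+v, v, h, state)
--             else:
--                 return 0
--         except IndexError:
--             return 0
-- ===== SOURCE B (Python) =====
-- def count_discs(x, y, v, h, state):
--     if v == 0 and h == 0:
--         axes = ((-1, 0), (0, -1), (-1, -1), (-1, 1))
--         return 1 + max(_scan(x, y, dv, dh, state) + _scan(x, y, -dv, -dh, state)
--                        for dv, dh in axes)
--     return _scan(x, y, v, h, state)
--
--
-- def _cell(cx, cy, state):
--     try:
--         return state[cy][cx]
--     except IndexError:
--         return None
--
--
-- def _scan(x, y, v, h, state):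
--     n = 0
--     prev = _cell(x, y, state)
--     while True:
--         x += h
--         y += v
--         if x < 0 or y < 0:
--             return n
--         cur = _cell(x, y, state)
--         if prev is None or cur is None or prev != cur:
--             return n
--         n += 1
--         prev = cur
-- ===== Notes on version B (the rewrite author's own statement) =====
-- stated objective: alternative
-- what changed: The recursive directional walk (one Python stack frame per matched disc) is replaced by an iterative while-loop scan that keeps an explicit counter and caches the previously read cell, so each cell is indexed once instead of twice and the recursion depth is constant; the base case takes the max over a list of four axes instead of eight spelled-out recursive calls.
import Mathlib
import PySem

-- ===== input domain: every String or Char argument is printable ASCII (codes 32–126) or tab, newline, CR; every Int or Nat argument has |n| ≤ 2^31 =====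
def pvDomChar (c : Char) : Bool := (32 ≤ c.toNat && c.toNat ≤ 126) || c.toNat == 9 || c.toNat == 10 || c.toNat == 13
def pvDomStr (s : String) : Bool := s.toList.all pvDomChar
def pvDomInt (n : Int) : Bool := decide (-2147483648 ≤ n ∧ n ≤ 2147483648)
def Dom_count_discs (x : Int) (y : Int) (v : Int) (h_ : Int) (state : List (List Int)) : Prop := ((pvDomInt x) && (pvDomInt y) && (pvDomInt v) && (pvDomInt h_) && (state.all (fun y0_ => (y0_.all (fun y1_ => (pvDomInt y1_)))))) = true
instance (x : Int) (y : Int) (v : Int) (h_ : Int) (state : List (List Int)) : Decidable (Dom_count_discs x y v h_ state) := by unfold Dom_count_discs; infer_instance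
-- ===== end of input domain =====

-- B replaces A's recursive directional walk by an iterative scan that carries an
-- accumulator and caches the previously read cell (objective: alternative decomposition).

-- state[cy][cx] with Python index semantics; none = IndexError (shared cell reader)
def pvCell (cx : Int) (cy : Int) (state : List (List Int)) : Option Int :=
  (PySem.List.pyGet? state cy).bind fun row => PySem.List.pyGet? row cx

-- termination measure for the directional walk: the walked coordinate moves
-- monotonically and stays inside [0, len) after a successful step
def pvMeas (x : Int) (y : Int) (v : Int) (h_ : Int) (state : List (List Int)) : Nat :=
  if 0 < v then ((state.length : Int) - y).toNat
  else if v < 0 then (y + 1).toNat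
  else if 0 < h_ then (((PySem.List.pyGet? state y).elim 0 (fun r => (r.length : Int))) - x).toNat
  else (x + 1).toNat

theorem pvMeas_lt {x y v h_ : Int} {state : List (List Int)} {b : Int}
    (hvh : v = 0 → ¬h_ = 0) (hb : 0 ≤ x + h_ ∧ 0 ≤ y + v)
    (h2 : pvCell (x + h_) (y + v) state = some b) :
    pvMeas (x + h_) (y + v) v h_ state < pvMeas x y v h_ state := by
  obtain ⟨hx, hy⟩ := hb
  unfold pvCell at h2
  cases hrow : PySem.List.pyGet? state (y + v) with
  | none => rw [hrow] at h2; simp at h2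
  | some row =>
    rw [hrow] at h2
    simp only [Option.bind_some] at h2
    rw [PySem.List.pyGet?_of_nonneg state hy] at hrow
    rw [PySem.List.pyGet?_of_nonneg row hx] at h2
    have hylen : (y + v).toNat < state.length := (List.getElem?_eq_some_iff.mp hrow).1
    have hxlen : (x + h_).toNat < row.length := (List.getElem?_eq_some_iff.mp h2).1
    unfold pvMeas
    rcases lt_trichotomy v 0 with hv | hv | hv
    · simp only [if_neg (by omega : ¬ 0 < v), if_pos hv]
      omega
    · subst hv
      have hh : h_ ≠ 0 := hvh rfl
      have hA : PySem.List.pyGet? state y = some row := by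
        rw [PySem.List.pyGet?_of_nonneg state (by omega)]
        simpa using hrow
      have hB : PySem.List.pyGet? state (y + 0) = some row := by
        simpa using hA
      simp only [if_neg (by omega : ¬ (0:Int) < 0), hA, hB, Option.elim_some]
      rcases lt_or_gt_of_ne hh with hh' | hh'
      · simp only [if_neg (by omega : ¬ 0 < h_)]; omega
      · simp only [if_pos hh']; omega
    · simp only [if_pos hv]
      omega

-- ===== PORT A =====
def count_discs (x : Int) (y : Int) (v : Int) (h_ : Int) (state : List (List Int)) : Int :=
  if hvh : v = 0 ∧ h_ = 0 then
    1 + (PySem.List.max? [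
        count_discs x y (-1) 0 state + count_discs x y 1 0 state,
        count_discs x y 0 (-1) state + count_discs x y 0 1 state,
        count_discs x y (-1) (-1) state + count_discs x y 1 1 state,
        count_discs x y (-1) 1 state + count_discs x y 1 (-1) state] (fun z => z)).getD 0
  else
    if hbnd : x + h_ < 0 ∨ y + v < 0 then 0
    else
      match pvCell x y state, hb : pvCell (x + h_) (y + v) state with
      | some a, some b => if a = b then 1 + count_discs (x + h_) (y + v) v h_ state else 0
      | _, _ => 0
termination_by ((if v = 0 ∧ h_ = 0 then 1 else 0 : Nat), pvMeas x y v h_ state)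
decreasing_by
  · exact Prod.Lex.left _ _ (by simp_all)
  · exact Prod.Lex.left _ _ (by simp_all)
  · exact Prod.Lex.left _ _ (by simp_all)
  · exact Prod.Lex.left _ _ (by simp_all)
  · exact Prod.Lex.left _ _ (by simp_all)
  · exact Prod.Lex.left _ _ (by simp_all)
  · exact Prod.Lex.left _ _ (by simp_all)
  · exact Prod.Lex.left _ _ (by simp_all)
  · have h := pvMeas_lt (b := b) (by tauto) (by omega) hb
    simp only [if_neg hvh]
    exact Prod.Lex.right _ h

-- ===== PORT B =====
-- the while-loop of _scan: n is the accumulator, prev the cached current cell;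
-- the `v = 0 ∧ h_ = 0` branch only makes the recursion total (B never calls it so)
def pvScan (x : Int) (y : Int) (v : Int) (h_ : Int) (state : List (List Int))
    (prev : Option Int) (n : Int) : Int :=
  if hvh : v = 0 ∧ h_ = 0 then n
  else
    if hbnd : x + h_ < 0 ∨ y + v < 0 then n
    else
      match prev with
      | none => n
      | some p =>
        match hb : pvCell (x + h_) (y + v) state with
        | none => n
        | some cur =>
            if p = cur then pvScan (x + h_) (y + v) v h_ state (some cur) (n + 1) else n
termination_by pvMeas x y v h_ state
decreasing_by
  exact pvMeas_lt (b := cur) (by tauto) (by omega) hb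

def pvScanStart (x : Int) (y : Int) (v : Int) (h_ : Int) (state : List (List Int)) : Int :=
  pvScan x y v h_ state (pvCell x y state) 0

def count_discs_alt (x : Int) (y : Int) (v : Int) (h_ : Int) (state : List (List Int)) : Int :=
  if v = 0 ∧ h_ = 0 then
    1 + (PySem.List.max?
        (([((-1 : Int), (0 : Int)), (0, -1), (-1, -1), (-1, 1)]).map fun d =>
          pvScanStart x y d.1 d.2 state + pvScanStart x y (-d.1) (-d.2) state)
        (fun z => z)).getD 0
  else pvScanStart x y v h_ state

-- ===== PRECONDITION & SPEC =====
def Spec_count_discs (x : Int) (y : Int) (v : Int) (h_ : Int) (state : List (List Int)) (out : Int) : Prop := out = count_discs_alt x y v h_ state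
instance (x : Int) (y : Int) (v : Int) (h_ : Int) (state : List (List Int)) (out : Int) : Decidable (Spec_count_discs x y v h_ state out) := by unfold Spec_count_discs; infer_instance

-- ===== CLAIM (what is proved, stated in full; the proofs are below) =====
def Claim_equal_count_discs : Prop := ∀ (x : Int) (y : Int) (v : Int) (h_ : Int) (state : List (List Int)), Dom_count_discs x y v h_ state → Spec_count_discs x y v h_ state (count_discs x y v h_ state)

-- ===== LEMMAS AND PROOFS =====

theorem count_discs_stop (x y v h_ : Int) (state : List (List Int))
    (hvh : ¬(v = 0 ∧ h_ = 0)) (hbnd : x + h_ < 0 ∨ y + v < 0) :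
    count_discs x y v h_ state = 0 := by
  rw [count_discs.eq_def, dif_neg hvh, dif_pos hbnd]

theorem count_discs_noneA (x y v h_ : Int) (state : List (List Int))
    (hvh : ¬(v = 0 ∧ h_ = 0)) (hbnd : ¬(x + h_ < 0 ∨ y + v < 0))
    (hA : pvCell x y state = none) :
    count_discs x y v h_ state = 0 := by
  rw [count_discs.eq_def, dif_neg hvh, dif_neg hbnd]
  split <;> simp_all

theorem count_discs_noneB (x y v h_ : Int) (state : List (List Int))
    (hvh : ¬(v = 0 ∧ h_ = 0)) (hbnd : ¬(x + h_ < 0 ∨ y + v < 0))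
    (hB : pvCell (x + h_) (y + v) state = none) :
    count_discs x y v h_ state = 0 := by
  rw [count_discs.eq_def, dif_neg hvh, dif_neg hbnd]
  split <;> simp_all

theorem count_discs_step (x y v h_ a b : Int) (state : List (List Int))
    (hvh : ¬(v = 0 ∧ h_ = 0)) (hbnd : ¬(x + h_ < 0 ∨ y + v < 0))
    (hA : pvCell x y state = some a) (hB : pvCell (x + h_) (y + v) state = some b) :
    count_discs x y v h_ state =
      if a = b then 1 + count_discs (x + h_) (y + v) v h_ state else 0 := by
  rw [count_discs.eq_def, dif_neg hvh, dif_neg hbnd]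
  split <;> simp_all

theorem pvScan_stop (x y v h_ : Int) (state : List (List Int)) (prev : Option Int) (n : Int)
    (hvh : ¬(v = 0 ∧ h_ = 0)) (hbnd : x + h_ < 0 ∨ y + v < 0) :
    pvScan x y v h_ state prev n = n := by
  rw [pvScan.eq_def, dif_neg hvh, dif_pos hbnd]

theorem pvScan_noneP (x y v h_ : Int) (state : List (List Int)) (n : Int)
    (hvh : ¬(v = 0 ∧ h_ = 0)) (hbnd : ¬(x + h_ < 0 ∨ y + v < 0)) :
    pvScan x y v h_ state none n = n := by
  rw [pvScan.eq_def, dif_neg hvh, dif_neg hbnd]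

theorem pvScan_noneB (x y v h_ p : Int) (state : List (List Int)) (n : Int)
    (hvh : ¬(v = 0 ∧ h_ = 0)) (hbnd : ¬(x + h_ < 0 ∨ y + v < 0))
    (hB : pvCell (x + h_) (y + v) state = none) :
    pvScan x y v h_ state (some p) n = n := by
  rw [pvScan.eq_def, dif_neg hvh, dif_neg hbnd]
  simp only []
  split <;> simp_all

theorem pvScan_step (x y v h_ p b : Int) (state : List (List Int)) (n : Int)
    (hvh : ¬(v = 0 ∧ h_ = 0)) (hbnd : ¬(x + h_ < 0 ∨ y + v < 0))
    (hB : pvCell (x + h_) (y + v) state = some b) :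
    pvScan x y v h_ state (some p) n =
      if p = b then pvScan (x + h_) (y + v) v h_ state (some b) (n + 1) else n := by
  rw [pvScan.eq_def, dif_neg hvh, dif_neg hbnd]
  simp only []
  split <;> simp_all

theorem scan_eq_count (v h_ : Int) (hvh : ¬(v = 0 ∧ h_ = 0)) :
    ∀ (m : Nat) (x y n : Int) (state : List (List Int)), pvMeas x y v h_ state ≤ m →
      pvScan x y v h_ state (pvCell x y state) n = n + count_discs x y v h_ state := by
  intro m
  induction m with
  | zero =>
    intro x y n state hm
    by_cases hbnd : x + h_ < 0 ∨ y + v < 0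
    · rw [count_discs_stop x y v h_ state hvh hbnd, pvScan_stop x y v h_ state _ n hvh hbnd]
      ring
    · cases hA : pvCell x y state with
      | none =>
        rw [count_discs_noneA x y v h_ state hvh hbnd hA, pvScan_noneP x y v h_ state n hvh hbnd]
        ring
      | some a =>
        cases hB : pvCell (x + h_) (y + v) state with
        | none =>
          rw [count_discs_noneB x y v h_ state hvh hbnd hB,
              pvScan_noneB x y v h_ a state n hvh hbnd hB]
          ring
        | some b =>
          exact absurd (pvMeas_lt (b := b) (by tauto) (by omega) hB) (by omega)
  | succ m ih =>
    intro x y n state hm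
    by_cases hbnd : x + h_ < 0 ∨ y + v < 0
    · rw [count_discs_stop x y v h_ state hvh hbnd, pvScan_stop x y v h_ state _ n hvh hbnd]
      ring
    · cases hA : pvCell x y state with
      | none =>
        rw [count_discs_noneA x y v h_ state hvh hbnd hA, pvScan_noneP x y v h_ state n hvh hbnd]
        ring
      | some a =>
        cases hB : pvCell (x + h_) (y + v) state with
        | none =>
          rw [count_discs_noneB x y v h_ state hvh hbnd hB,
              pvScan_noneB x y v h_ a state n hvh hbnd hB]
          ring
        | some b =>
          rw [count_discs_step x y v h_ a b state hvh hbnd hA hB,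
              pvScan_step x y v h_ a b state n hvh hbnd hB]
          have hlt : pvMeas (x + h_) (y + v) v h_ state < pvMeas x y v h_ state :=
            pvMeas_lt (b := b) (by tauto) (by omega) hB
          by_cases hab : a = b
          · rw [if_pos hab, if_pos hab, ← hB,
                ih (x + h_) (y + v) (n + 1) state (by omega)]
            ring
          · rw [if_neg hab, if_neg hab]
            ring

theorem count_discs_spec' (x y v h_ : Int) (state : List (List Int)) :
    count_discs x y v h_ state = count_discs_alt x y v h_ state := by
  by_cases hvh : v = 0 ∧ h_ = 0
  · rw [count_discs.eq_def, count_discs_alt, dif_pos hvh, if_pos hvh]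
    simp only [List.map_cons, List.map_nil, neg_neg, neg_zero]
    have e : ∀ dv dh : Int, ¬(dv = 0 ∧ dh = 0) →
        pvScanStart x y dv dh state = count_discs x y dv dh state := by
      intro dv dh hd
      unfold pvScanStart
      rw [scan_eq_count dv dh hd (pvMeas x y dv dh state) x y 0 state le_rfl]
      ring
    rw [e (-1) 0 (by simp), e 1 0 (by simp), e 0 (-1) (by simp), e 0 1 (by simp),
        e (-1) (-1) (by simp), e 1 1 (by simp), e (-1) 1 (by simp), e 1 (-1) (by simp)]
  · rw [count_discs_alt, if_neg hvh]
    unfold pvScanStart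
    rw [scan_eq_count v h_ hvh (pvMeas x y v h_ state) x y 0 state le_rfl]
    ring

-- ===== VERDICT (by name: the statement is the Claim_ definition above) =====
theorem count_discs_spec : Claim_equal_count_discs := by
  intro x y v h_ state _
  exact count_discs_spec' x y v h_ state
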